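-- pv_equiv track=rewrite | github.com/wangjiaqi886/LTA-Thinker | evaluate.py | restore_original_list
-- ===== SOURCE A (Python) =====
-- def restore_original_list(aggregated_dict):
--     if not aggregated_dict:
--         return []
--
--     keys = list(aggregated_dict.keys())
--     first_key = keys[0]
--     expected_length = len(aggregated_dict[first_key])
--
--     for key in keys[1:]:
--         if len(aggregated_dict[key]) != expected_length:
--             raise ValueError(f"键 '{key}' 的列表长度不一致，无法还原")
--     return [
--         {key: aggregated_dict[key][i] for key in keys} for i in range(expected_length)
--     ]
-- ===== SOURCE B (Python) =====
-- def restore_original_list(aggregated_dict):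
--     if not aggregated_dict:
--         return []
--
--     rows = None
--     for key, values in aggregated_dict.items():
--         if rows is None:
--             rows = [{} for _ in values]
--         elif len(values) != len(rows):
--             raise ValueError(f"键 '{key}' 的列表长度不一致，无法还原")
--         for row, v in zip(rows, values):
--             row[key] = v
--     return rows
-- ===== Notes on version B (the rewrite author's own statement) =====
-- stated objective: alternative
-- what changed: B replaces A's row-wise construction (for each index i build a dict by looking up every key's i-th element) with a single column-wise pass that iterates once over the dict's items and writes each value into a list of per-row accumulator dicts, validating lengths on the fly.
import Mathlib
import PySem

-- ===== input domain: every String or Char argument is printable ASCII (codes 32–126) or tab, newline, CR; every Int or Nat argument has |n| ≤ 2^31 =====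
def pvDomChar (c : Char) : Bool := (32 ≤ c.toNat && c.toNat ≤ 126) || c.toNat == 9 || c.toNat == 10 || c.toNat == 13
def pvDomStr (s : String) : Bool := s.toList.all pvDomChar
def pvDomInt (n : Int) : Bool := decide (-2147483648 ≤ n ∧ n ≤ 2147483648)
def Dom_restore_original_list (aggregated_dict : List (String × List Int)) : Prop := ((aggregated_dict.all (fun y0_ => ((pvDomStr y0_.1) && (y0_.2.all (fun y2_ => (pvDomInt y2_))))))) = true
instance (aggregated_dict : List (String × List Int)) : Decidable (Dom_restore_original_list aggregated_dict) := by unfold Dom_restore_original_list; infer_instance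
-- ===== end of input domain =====

-- B rebuilds the rows in a single column-wise pass: it iterates once over the dict's
-- (key, values) items and writes each value into a per-row accumulator dict, instead of
-- A's row-wise pass that indexes every column by an integer i (objective: alternative).

-- ===== PORT A =====
-- A: index-based rows — for each i in range(expected_length), {key: d[key][i] for key in keys}.
def restore_original_list (aggregated_dict : List (String × List Int)) : List (List (String × Int)) :=
  let d := PySem.Dict.ofList aggregated_dict
  if d.items = [] then []
  else
    let keys := d.keys
    let first_key := keys.headD ""
    let expected_length : Int := ((d.getD first_key []).length : Int)
    if keys.tail.all (fun k => (((d.getD k []).length : Int) == expected_length)) then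
      (PySem.List.pyRange 0 expected_length 1).map (fun i =>
        (PySem.Dict.ofList (keys.map (fun k => (k, PySem.List.pyGetD (d.getD k []) i 0)))).items)
    else []  -- Python raises ValueError here; these inputs are excluded by Pre_

-- ===== PORT B =====
-- 'for row, v in zip(rows, values): row[key] = v' — write one column into the row accumulators.
def pvFillRows (rows : List (PySem.Dict String Int)) (key : String) (values : List Int) :
    List (PySem.Dict String Int) :=
  (rows.zip values).map (fun rv => rv.1.insert key rv.2)

-- B: single pass over items; state = (rows accumulator or None, error flag).
def restore_original_list_alt (aggregated_dict : List (String × List Int)) : List (List (String × Int)) :=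
  let d := PySem.Dict.ofList aggregated_dict
  if d.items = [] then []
  else
    let st := d.items.foldl
      (fun (st : Option (List (PySem.Dict String Int)) × Bool) kv =>
        match st with
        | (none, e) => (some (pvFillRows (kv.2.map (fun _ => PySem.Dict.empty)) kv.1 kv.2), e)
        | (some rows, e) =>
          if e then (some rows, e)   -- Python's raise aborted the loop already
          else if kv.2.length ≠ rows.length then (some rows, true)
          else (some (pvFillRows rows kv.1 kv.2), e))
      (none, false)
    match st with
    | (some rows, false) => rows.map (fun r => r.items)
    | _ => []  -- Python raises ValueError here; these inputs are excluded by Pre_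

-- ===== PRECONDITION & SPEC =====
-- Pre_ excludes exactly the inputs on which A raises ValueError: dicts whose value lists
-- do not all have the same length.
def Pre_restore_original_list (aggregated_dict : List (String × List Int)) : Prop :=
  ∀ p ∈ (PySem.Dict.ofList aggregated_dict).items, ∀ q ∈ (PySem.Dict.ofList aggregated_dict).items,
    p.2.length = q.2.length
instance (aggregated_dict : List (String × List Int)) : Decidable (Pre_restore_original_list aggregated_dict) := by unfold Pre_restore_original_list; infer_instance

def pvWitness_restore_original_list : (List (String × List Int)) := [("a", [1, 2]), ("b", [3, 4])]

def Spec_restore_original_list (aggregated_dict : List (String × List Int)) (out : List (List (String × Int))) : Prop := out = restore_original_list_alt aggregated_dict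
instance (aggregated_dict : List (String × List Int)) (out : List (List (String × Int))) : Decidable (Spec_restore_original_list aggregated_dict out) := by unfold Spec_restore_original_list; infer_instance

-- ===== CLAIM (what is proved, stated in full; the proofs are below) =====
def Claim_equal_restore_original_list : Prop := ∀ (aggregated_dict : List (String × List Int)), Dom_restore_original_list aggregated_dict → Pre_restore_original_list aggregated_dict → Spec_restore_original_list aggregated_dict (restore_original_list aggregated_dict)

-- ===== LEMMAS AND PROOFS =====

-- the common value both programs compute: row i pairs each item's key with its i-th value
def pvRowsSpec (items : List (String × List Int)) (n : Nat) : List (List (String × Int)) :=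
  (List.range n).map (fun i => items.map (fun kv => (kv.1, kv.2.getD i 0)))

lemma map_zip_self {α β γ : Type} (l : List α) (f : α → β) (g : β × α → γ) :
    ((l.map f).zip l).map g = l.map (fun x => g (f x, x)) := by
  induction l with
  | nil => rfl
  | cons x xs ih => simp [ih]

lemma map_eq_range_map {α β : Type} [Inhabited α] (l : List α) (g : α → β) (d : α) :
    l.map g = (List.range l.length).map (fun i => g (l.getD i d)) := by
  apply List.ext_getElem (by simp)
  intro i h1 h2
  have hl : i < l.length := by simpa using h1
  simp [List.getD_eq_getElem?_getD, List.getElem?_eq_getElem hl]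

lemma zip_range_map {α : Type} (n : Nat) (f : Nat → α) (v : List Int) (hv : v.length = n) :
    ((List.range n).map f).zip v = (List.range n).map (fun i => (f i, v.getD i 0)) := by
  apply List.ext_getElem (by simp [hv])
  intro i h1 h2
  have hi : i < n := by simpa [hv] using h1
  have hv' : i < v.length := by omega
  simp [List.getD_eq_getElem?_getD, List.getElem?_eq_getElem hv']

lemma mk_insert_fresh (l : List (String × Int)) (k : String) (v : Int)
    (h : k ∉ l.map Prod.fst) :
    (PySem.Dict.mk l).insert k v = PySem.Dict.mk (l ++ [(k, v)]) := by
  have hc : (PySem.Dict.mk l).contains k = false := by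
    rw [PySem.Dict.contains_eq_decide_mem_keys]
    simp [PySem.Dict.keys, h]
  apply PySem.Dict.ext
  rw [PySem.Dict.items_insert_of_not_contains _ _ hc]

lemma ofList_items_of_nodup (l : List (String × Int)) (h : (l.map Prod.fst).Nodup) :
    (PySem.Dict.ofList l).items = l := by
  have := PySem.Dict.items_foldl_insert_fresh (l := l) (k := Prod.fst) (v := Prod.snd)
    (d := PySem.Dict.empty) (by simp) h
  simpa [PySem.Dict.ofList] using this

-- invariant of B's fold: after processing prefix P, the accumulator holds exactly the rows of P
lemma foldB_inv (n : Nat) :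
    ∀ (L P : List (String × List Int)),
    (∀ kv ∈ L, kv.2.length = n) →
    (((P ++ L).map Prod.fst).Nodup) →
    L.foldl
      (fun (st : Option (List (PySem.Dict String Int)) × Bool) kv =>
        match st with
        | (none, e) => (some (pvFillRows (kv.2.map (fun _ => PySem.Dict.empty)) kv.1 kv.2), e)
        | (some rows, e) =>
          if e then (some rows, e)
          else if kv.2.length ≠ rows.length then (some rows, true)
          else (some (pvFillRows rows kv.1 kv.2), e))
      (some ((List.range n).map (fun i => PySem.Dict.mk (P.map (fun kv => (kv.1, kv.2.getD i 0))))), false)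
    = (some ((List.range n).map (fun i => PySem.Dict.mk ((P ++ L).map (fun kv => (kv.1, kv.2.getD i 0))))), false) := by
  intro L
  induction L with
  | nil => intro P _ _; simp
  | cons kv rest ih =>
    intro P hlen hnd
    have hkv : kv.2.length = n := hlen kv (by simp)
    rw [List.foldl_cons]
    have hne : ¬(kv.2.length ≠ ((List.range n).map (fun i => PySem.Dict.mk (P.map (fun kv => (kv.1, kv.2.getD i 0))))).length) := by
      simp [hkv]
    simp only [Bool.false_eq_true, if_false, if_neg hne]
    have hstep : pvFillRows ((List.range n).map (fun i => PySem.Dict.mk (P.map (fun kv => (kv.1, kv.2.getD i 0))))) kv.1 kv.2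
        = (List.range n).map (fun i => PySem.Dict.mk ((P ++ [kv]).map (fun kv => (kv.1, kv.2.getD i 0)))) := by
      unfold pvFillRows
      rw [zip_range_map n _ kv.2 hkv, List.map_map]
      apply List.map_congr_left
      intro i _
      have hfresh : kv.1 ∉ (P.map (fun kv => (kv.1, kv.2.getD i 0))).map Prod.fst := by
        intro hmem
        have hmem' : kv.1 ∈ P.map Prod.fst := by simpa [List.map_map] using hmem
        simp only [List.map_append] at hnd
        exact (List.disjoint_of_nodup_append hnd) hmem' (by simp)
      simp only [Function.comp_apply, mk_insert_fresh _ _ _ hfresh]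
      simp
    rw [hstep]
    have := ih (P ++ [kv]) (fun x hx => hlen x (by simp [hx])) (by simpa using hnd)
    simpa using this

-- B computes pvRowsSpec
lemma alt_eq_spec (ad : List (String × List Int)) (k0 : String) (v0 : List Int)
    (rest : List (String × List Int))
    (hitems : (PySem.Dict.ofList ad).items = (k0, v0) :: rest)
    (hlen : ∀ kv ∈ (PySem.Dict.ofList ad).items, kv.2.length = v0.length) :
    restore_original_list_alt ad = pvRowsSpec ((k0, v0) :: rest) v0.length := by
  have hnd : (((k0, v0) :: rest).map Prod.fst).Nodup := by
    have := PySem.Dict.nodup_keys_ofList ad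
    simpa [PySem.Dict.keys, hitems] using this
  unfold restore_original_list_alt
  simp only [hitems, List.foldl_cons, reduceCtorEq, if_false]
  have hfirst : pvFillRows (v0.map (fun _ => PySem.Dict.empty)) k0 v0
      = (List.range v0.length).map (fun i => PySem.Dict.mk ([((k0, v0) : String × List Int)].map (fun kv => (kv.1, kv.2.getD i 0)))) := by
    unfold pvFillRows
    rw [map_zip_self]
    have hins : (fun (x : Int) => (PySem.Dict.empty.insert k0 x : PySem.Dict String Int))
        = fun x => PySem.Dict.mk [(k0, x)] := by
      funext x
      have := mk_insert_fresh [] k0 x (by simp)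
      simpa [PySem.Dict.empty] using this
    rw [hins, map_eq_range_map v0 (fun x => PySem.Dict.mk [(k0, x)]) 0]
    simp
  rw [hfirst]
  have hrest := foldB_inv v0.length rest [(k0, v0)]
    (fun kv hkv => hlen kv (by simp [hitems, hkv])) (by simpa using hnd)
  simp only [List.singleton_append] at hrest
  rw [hrest]
  unfold pvRowsSpec
  simp [List.map_map]

-- ===== VERDICT (by name: the statement is the Claim_ definition above) =====
theorem restore_original_list_spec : Claim_equal_restore_original_list := by
  intro ad _ hpre
  unfold Spec_restore_original_list
  by_cases hempty : (PySem.Dict.ofList ad).items = []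
  · unfold restore_original_list restore_original_list_alt
    simp [hempty]
  · obtain ⟨⟨k0, v0⟩, rest, hitems⟩ :
        ∃ kv rest, (PySem.Dict.ofList ad).items = kv :: rest := by
      cases h : (PySem.Dict.ofList ad).items with
      | nil => exact absurd h hempty
      | cons a b => exact ⟨a, b, rfl⟩
    have hnd : (PySem.Dict.ofList ad).keys.Nodup := PySem.Dict.nodup_keys_ofList ad
    have hlen : ∀ kv ∈ (PySem.Dict.ofList ad).items, kv.2.length = v0.length := by
      intro kv hkv
      exact hpre kv hkv (k0, v0) (by rw [hitems]; simp)
    rw [alt_eq_spec ad k0 v0 rest hitems hlen]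
    -- now the A side
    unfold restore_original_list
    simp only [if_neg hempty]
    have hfk : (PySem.Dict.ofList ad).keys.headD "" = k0 := by
      simp [PySem.Dict.keys, hitems]
    have hgetfk : (PySem.Dict.ofList ad).getD k0 [] = v0 :=
      PySem.Dict.getD_of_mem_items _ (by rw [hitems]; simp) hnd []
    have hgetk : ∀ k ∈ (PySem.Dict.ofList ad).keys, ((PySem.Dict.ofList ad).getD k []).length = v0.length := by
      intro k hk
      have hmem : (k, (PySem.Dict.ofList ad).getD k []) ∈ (PySem.Dict.ofList ad).items := by
        rw [PySem.Dict.items_eq_map_keys _ hnd []]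
        exact List.mem_map_of_mem hk
      exact hlen _ hmem
    have hguard : (PySem.Dict.ofList ad).keys.tail.all
        (fun k => ((((PySem.Dict.ofList ad).getD k []).length : Int) == (((PySem.Dict.ofList ad).getD ((PySem.Dict.ofList ad).keys.headD "") []).length : Int))) = true := by
      rw [List.all_eq_true]
      intro k hk
      rw [hfk, hgetfk]
      simp [hgetk k (List.mem_of_mem_tail hk)]
    rw [if_pos hguard, hfk, hgetfk, PySem.List.pyRange_zero_natCast]
    unfold pvRowsSpec
    rw [List.map_map]
    apply List.map_congr_left
    intro i hi
    simp only [Function.comp_apply]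
    have hinner : (PySem.Dict.ofList ad).keys.map (fun k => (k, PySem.List.pyGetD ((PySem.Dict.ofList ad).getD k []) (i : Int) 0))
        = ((k0, v0) :: rest).map (fun kv => (kv.1, kv.2.getD i 0)) := by
      rw [← hitems, PySem.Dict.items_eq_map_keys _ hnd [], List.map_map]
      apply List.map_congr_left
      intro k _
      simp [PySem.List.pyGetD_natCast]
    rw [hinner]
    apply ofList_items_of_nodup
    have hfst : (((k0, v0) :: rest).map (fun kv => (kv.1, kv.2.getD i 0))).map Prod.fst
        = (PySem.Dict.ofList ad).keys := by
      rw [← hitems, List.map_map, PySem.Dict.keys]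
      rfl
    rw [hfst]
    exact hnd
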